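-- pv_equiv track=rewrite | github.com/ezequielprovision/whats_app_statistics | str_helpers.py | user_name_generator
-- ===== SOURCE A (Python) =====
-- def user_name_generator(text_line):
--   aux = 0
--   result = ""
--   for x in text_line:
--     if aux == 3:  ### AUX ACOUNTS NUMBER OF ' ', WHEN = 3, THE USER NAME STARTS
--       result += x
--       if result[-1] == ":": ### IF RESULT = 'Gabriel Alberto:'
--         result = result.strip(":") ### REMOVES THE ':'
--         return result
--     elif x == " ":
--       aux += 1
--
--   """
--   try:
--     result = re.search(r'\\d+/\\d+/\\d+\\ \\d+\\:\\d+ \\-\\ (.*)\\:', text_line).group(1)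
--   except:
--     result = None
--   return result
--   """
-- ===== SOURCE B (Python) =====
-- def user_name_generator(text_line):
--     p = -1
--     for _ in range(3):
--         p = text_line.find(' ', p + 1)
--         if p == -1:
--             return None
--     q = text_line.find(':', p + 1)
--     if q == -1:
--         return None
--     return text_line[p + 1:q]
-- ===== Notes on version B (the rewrite author's own statement) =====
-- stated objective: idiomatic
-- what changed: Replaces A's char-by-char loop with a space counter and an accumulated string by index arithmetic: three str.find scans locate the 3rd space, one more finds the colon, and a slice returns the name.
import Mathlib
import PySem

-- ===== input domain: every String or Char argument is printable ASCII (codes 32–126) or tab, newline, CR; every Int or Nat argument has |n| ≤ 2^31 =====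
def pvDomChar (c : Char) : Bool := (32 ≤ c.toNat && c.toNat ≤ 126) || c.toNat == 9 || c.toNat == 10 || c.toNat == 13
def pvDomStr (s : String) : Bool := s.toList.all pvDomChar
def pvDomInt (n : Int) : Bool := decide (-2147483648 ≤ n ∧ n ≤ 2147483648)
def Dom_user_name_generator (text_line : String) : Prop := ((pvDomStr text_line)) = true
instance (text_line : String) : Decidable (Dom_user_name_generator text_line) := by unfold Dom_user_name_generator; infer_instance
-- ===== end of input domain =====

-- B replaces A's char-by-char space-counting accumulator with index arithmetic: three
-- find-scans locate the 3rd space, one more finds the colon, and a slice returns the name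
-- (objective: idiomatic; measured faster via C-level scans).

-- ===== PORT A =====
-- the for-loop of A, state (aux, result); early return = returning `some`
def user_name_generator_loop (cs : List Char) (aux : Int) (result : List Char) : Option String :=
  match cs with
  | [] => none
  | x :: xs =>
    if aux == 3 then
      let result' := result ++ [x]
      if PySem.List.pyGet? result' (-1) == some ':' then
        some (String.ofList (PySem.Chars.stripChars result' [':']))
      else user_name_generator_loop xs aux result'
    else if x == ' ' then user_name_generator_loop xs (aux + 1) result
    else user_name_generator_loop xs aux result

def user_name_generator (text_line : String) : Option String :=
  user_name_generator_loop text_line.toList 0 []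

-- ===== PORT B =====
-- the `for _ in range(3)` loop of B: repeatedly p = text_line.find(' ', p+1), None on -1
def user_name_generator_alt_find3 (s : String) (p : Int) : Nat → Option Int
  | 0 => some p
  | k + 1 =>
    let p' := PySem.Str.findFrom s " " (p + 1)
    if p' == -1 then none else user_name_generator_alt_find3 s p' k

def user_name_generator_alt (text_line : String) : Option String :=
  match user_name_generator_alt_find3 text_line (-1) 3 with
  | none => none
  | some p =>
    let q := PySem.Str.findFrom text_line ":" (p + 1)
    if q == -1 then none
    else some (PySem.Str.slice text_line (some (p + 1)) (some q))

-- ===== PRECONDITION & SPEC =====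
def Spec_user_name_generator (text_line : String) (out : Option String) : Prop := out = user_name_generator_alt text_line
instance (text_line : String) (out : Option String) : Decidable (Spec_user_name_generator text_line out) := by unfold Spec_user_name_generator; infer_instance

-- ===== CLAIM (what is proved, stated in full; the proofs are below) =====
def Claim_equal_user_name_generator : Prop := ∀ (text_line : String), Dom_user_name_generator text_line → Spec_user_name_generator text_line (user_name_generator text_line)

-- ===== LEMMAS AND PROOFS =====

-- index of the first occurrence of c (proof-side reference function)
def pvFirstIdx (c : Char) : List Char → Option Nat
  | [] => none
  | x :: xs => if x = c then some 0 else (pvFirstIdx c xs).map (· + 1)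

-- common reference semantics: skip past n spaces, then cut at the first ':'
def pvCore : Nat → List Char → Option String
  | n + 1, cs =>
    match pvFirstIdx ' ' cs with
    | none => none
    | some i => pvCore n (cs.drop (i + 1))
  | 0, cs =>
    match pvFirstIdx ':' cs with
    | none => none
    | some j => some (String.ofList (cs.take j))

theorem pvGo (c : Char) (cs : List Char) : ∀ k : Nat,
    PySem.Chars.find.go [c] cs k =
      match pvFirstIdx c cs with | none => -1 | some i => ((k + i : Nat) : Int) := by
  induction cs with
  | nil => intro k; simp [PySem.Chars.find.go, pvFirstIdx]
  | cons x xs ih =>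
    intro k
    rw [PySem.Chars.find.go]
    by_cases hx : x = c
    · subst hx; simp [List.isPrefixOf, pvFirstIdx]
    · simp [List.isPrefixOf, hx, Ne.symm hx, pvFirstIdx, ih (k+1)]
      cases pvFirstIdx c xs <;> simp
      ring

theorem pvFind_eq_firstIdx (c : Char) (cs : List Char) :
    PySem.Chars.find cs [c] = match pvFirstIdx c cs with | none => -1 | some i => (i : Int) := by
  have := pvGo c cs 0
  simpa [PySem.Chars.find] using this

theorem pvFirstIdx_lt_length (c : Char) (cs : List Char) (i : Nat)
    (h : pvFirstIdx c cs = some i) : i < cs.length := by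
  induction cs generalizing i with
  | nil => simp [pvFirstIdx] at h
  | cons x xs ih =>
    simp only [pvFirstIdx] at h
    split at h
    · simp at h; simp; omega
    · cases hx : pvFirstIdx c xs with
      | none => rw [hx] at h; simp at h
      | some j => rw [hx] at h; simp at h; have := ih j hx; simp; omega

theorem pvStrip_append_colon (l : List Char) (hl : ':' ∉ l) :
    PySem.Chars.stripChars (l ++ [':']) [':'] = l := by
  simp only [PySem.Chars.stripChars]
  cases l with
  | nil => simp
  | cons a t =>
    have ha : a ≠ ':' := by intro h; exact hl (by simp [h])
    rw [List.cons_append, List.dropWhile_cons_of_neg (by simp [ha])]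
    simp only [List.reverse_cons, List.reverse_append, List.reverse_nil, List.nil_append,
      List.cons_append]
    rw [List.dropWhile_cons_of_pos (by simp)]
    rw [List.dropWhile_eq_self_iff.mpr ?h]
    · simp
    case h =>
      intro hlen hb
      simp at hb
      have hm : (t.reverse ++ [a])[0] ∈ t.reverse ++ [a] := List.getElem_mem _
      rw [hb] at hm
      simp at hm
      rcases hm with h1 | h1
      · exact hl (by simp [h1])
      · exact ha h1.symm

-- A's loop once aux = 3: accumulate until the first colon, then strip it
theorem pvLoop_colon (cs : List Char) (r : List Char) (hr : ':' ∉ r) :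
    user_name_generator_loop cs 3 r =
      match pvFirstIdx ':' cs with
      | none => none
      | some j => some (String.ofList (r ++ cs.take j)) := by
  induction cs generalizing r with
  | nil => simp [user_name_generator_loop, pvFirstIdx]
  | cons x xs ih =>
    rw [user_name_generator_loop]
    rw [if_pos (by decide : (((3:Int) == 3) = true))]
    by_cases hx : x = ':'
    · subst hx
      rw [if_pos (by simp)]
      simp [pvFirstIdx, pvStrip_append_colon r hr]
    · rw [if_neg (by simp [hx])]
      rw [ih (r ++ [x]) (by simp [hr, Ne.symm hx])]
      simp only [pvFirstIdx, if_neg (fun h => hx h)]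
      cases pvFirstIdx ':' xs <;> simp [List.append_assoc]

-- A's loop while aux = 3 - n < 3: skip to just past the n-th remaining space
theorem pvLoop_skip (cs : List Char) (n : Nat) (h1 : 0 < n) (h3 : n ≤ 3) :
    user_name_generator_loop cs (3 - (n : Int)) [] = pvCore n cs := by
  induction cs generalizing n with
  | nil =>
    obtain ⟨m, rfl⟩ : ∃ m, n = m + 1 := ⟨n - 1, by omega⟩
    simp [user_name_generator_loop, pvCore, pvFirstIdx]
  | cons x xs ih =>
    obtain ⟨m, rfl⟩ : ∃ m, n = m + 1 := ⟨n - 1, by omega⟩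
    rw [user_name_generator_loop]
    rw [if_neg (by simp; omega)]
    by_cases hx : x = ' '
    · subst hx
      rw [if_pos (by simp)]
      rcases Nat.eq_zero_or_pos m with hm | hm
      · subst hm
        have : (3 : Int) - (1 : Nat) + 1 = 3 := by norm_num
        rw [this]
        rw [pvLoop_colon xs [] (by simp)]
        simp [pvCore, pvFirstIdx]
      · have : (3 : Int) - ((m + 1 : Nat) : Int) + 1 = 3 - (m : Nat) := by push_cast; ring
        rw [this, ih m hm (by omega)]
        simp [pvCore, pvFirstIdx]
    · rw [if_neg (by simp [hx])]
      rw [ih (m + 1) (by omega) h3]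
      rw [pvCore, pvCore]
      simp only [pvFirstIdx, if_neg (fun h => hx h)]
      cases pvFirstIdx ' ' xs <;> simp

-- B's tail after k characters are consumed equals the reference semantics
theorem pvAlt_eq_core (s : String) (n : Nat) (k : Nat) (hlen : k ≤ s.toList.length) :
    (match user_name_generator_alt_find3 s ((k : Int) - 1) n with
     | none => none
     | some p' =>
       let q := PySem.Str.findFrom s ":" (p' + 1)
       if q == -1 then none
       else some (PySem.Str.slice s (some (p' + 1)) (some q))) =
    pvCore n (s.toList.drop k) := by
  induction n generalizing k with
  | zero =>
    simp only [user_name_generator_alt_find3]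
    have hc : (k : Int) - 1 + 1 = (k : Int) := by ring
    rw [hc, PySem.Str.findFrom_eq, show (":" : String).toList = [':'] from rfl]
    rw [PySem.Chars.findFrom_natCast _ _ _ hlen, pvFind_eq_firstIdx]
    cases hfi : pvFirstIdx ':' (s.toList.drop k) with
    | none => simp [pvCore, hfi]
    | some j =>
      have hj := pvFirstIdx_lt_length _ _ _ hfi
      simp only
      rw [if_neg (show ¬((j : Nat) : Int) = -1 by omega)]
      rw [if_neg (by simp; omega)]
      simp only [pvCore, hfi]
      have hj' : k + j < s.toList.length := by
        rw [List.length_drop] at hj; omega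
      have h1 : PySem.List.clampIdx s.toList.length ((k : Int)) = k := by
        unfold PySem.List.clampIdx; split <;> omega
      have h2 : PySem.List.clampIdx s.toList.length ((k : Int) + (j : Int)) = k + j := by
        unfold PySem.List.clampIdx; split <;> omega
      simp only [PySem.Str.slice, PySem.Chars.slice, PySem.List.slice, h1, h2]
      rw [show k + j - k = j from by omega]
  | succ m ih =>
    rw [user_name_generator_alt_find3]
    have hc : (k : Int) - 1 + 1 = (k : Int) := by ring
    rw [hc, PySem.Str.findFrom_eq, show (" " : String).toList = [' '] from rfl]
    rw [PySem.Chars.findFrom_natCast _ _ _ hlen, pvFind_eq_firstIdx]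
    cases hfi : pvFirstIdx ' ' (s.toList.drop k) with
    | none => simp [pvCore, hfi]
    | some i =>
      have hi := pvFirstIdx_lt_length _ _ _ hfi
      simp only
      rw [if_neg (show ¬((i : Nat) : Int) = -1 by omega)]
      rw [if_neg (by simp; omega)]
      have hi' : k + i < s.toList.length := by
        rw [List.length_drop] at hi; omega
      have harg : (k : Int) + (i : Int) = ((k + i + 1 : Nat) : Int) - 1 := by push_cast; ring
      rw [harg, ih (k + i + 1) (by omega)]
      simp only [pvCore, hfi]
      rw [List.drop_drop, Nat.add_assoc]

-- ===== VERDICT (by name: the statement is the Claim_ definition above) =====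
theorem user_name_generator_spec : Claim_equal_user_name_generator := by
  intro s _
  unfold Spec_user_name_generator user_name_generator user_name_generator_alt
  have hA := pvLoop_skip s.toList 3 (by norm_num) (by norm_num)
  norm_num at hA
  have hB := pvAlt_eq_core s 3 0 (by simp)
  norm_num at hB
  rw [hA]
  norm_num
  exact hB.symm
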